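-- pv_equiv track=rewrite | github.com/scuzzilla/snmp-poller | src/snmp_poller/poller.py | _partition_hosts
-- ===== SOURCE A (Python) =====
-- def _partition_hosts(records, num_workers):
--     '''Split {host: group} dict into num_workers roughly-equal chunks.'''
--     items = list(records.items())
--     chunks = []
--     chunk_size = len(items) // num_workers
--     remainder = len(items) % num_workers
--     start = 0
--
--     for i in range(num_workers):
--         end = start + chunk_size + (1 if i < remainder else 0)
--         chunks.append(dict(items[start:end]))
--         start = end
--
--     return chunks
-- ===== SOURCE B (Python) =====
-- def _partition_hosts(records, num_workers):
--     '''Split {host: group} dict into num_workers roughly-equal chunks.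
--
--     Single pass over the items: precompute per-chunk capacities, then fill the
--     current chunk until its capacity is exhausted, moving on to the next.'''
--     items = list(records.items())
--     chunk_size = len(items) // num_workers
--     remainder = len(items) % num_workers
--     sizes = [chunk_size + (1 if i < remainder else 0) for i in range(num_workers)]
--     remaining = iter(sizes)
--     chunks = []
--     current = {}
--     cap = next(remaining)
--     for key, value in items:
--         if cap == 0:
--             chunks.append(current)
--             current = {}
--             cap = next(remaining)
--         current[key] = value
--         cap -= 1
--     chunks.append(current)
--     chunks.extend({} for _ in remaining)
--     return chunks
-- ===== Notes on version B (the rewrite author's own statement) =====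
-- stated objective: alternative
-- what changed: Instead of looping over the num_workers worker indices and slicing items[start:end] for each, B precomputes the per-worker capacity list and makes one pass over the items, filling the current chunk until its capacity is exhausted and then moving to the next, padding trailing empty chunks at the end.
-- outside the precondition, e.g. on _partition_hosts({'a': 'g'}, -1): A returns [], B raises StopIteration; on _partition_hosts({}, -1): A returns [], B raises StopIteration
import Mathlib
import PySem

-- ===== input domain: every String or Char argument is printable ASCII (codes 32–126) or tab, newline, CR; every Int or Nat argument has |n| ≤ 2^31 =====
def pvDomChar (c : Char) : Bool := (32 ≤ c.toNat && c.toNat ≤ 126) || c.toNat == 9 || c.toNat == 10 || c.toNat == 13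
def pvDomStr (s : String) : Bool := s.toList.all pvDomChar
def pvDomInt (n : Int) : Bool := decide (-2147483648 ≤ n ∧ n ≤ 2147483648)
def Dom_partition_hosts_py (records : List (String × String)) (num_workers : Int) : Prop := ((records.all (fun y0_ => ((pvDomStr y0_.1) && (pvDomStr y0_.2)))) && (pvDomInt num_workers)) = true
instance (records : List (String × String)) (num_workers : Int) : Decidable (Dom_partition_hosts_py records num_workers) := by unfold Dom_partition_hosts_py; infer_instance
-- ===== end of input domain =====

-- B replaces A's per-worker slicing loop by one pass over the items that fills each
-- chunk up to a precomputed capacity (objective: alternative decomposition, same cost).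

-- ===== PORT A =====
-- loop body of A's 'for i in range(num_workers)': end = start + chunk_size + (1 if i < remainder else 0); chunks.append(dict(items[start:end])); start = end
def aStep (items : List (String × String)) (chunk_size remainder : Int)
    (st : List (List (String × String)) × Int) (i : Int) :
    List (List (String × String)) × Int :=
  let e := st.2 + chunk_size + (if i < remainder then 1 else 0)
  (st.1 ++ [(PySem.Dict.ofList (PySem.List.slice items (some st.2) (some e))).items], e)

def partition_hosts_py (records : List (String × String)) (num_workers : Int) :
    List (List (String × String)) :=
  let items := records
  let chunk_size := PySem.Int.floordiv (items.length : Int) num_workers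
  let remainder := PySem.Int.mod (items.length : Int) num_workers
  ((PySem.List.pyRange 0 num_workers 1).foldl (aStep items chunk_size remainder) ([], 0)).1

-- ===== PORT B =====
-- loop body of B's 'for key, value in items': close the current chunk when its capacity
-- is exhausted; st = (chunks, current, cap, items left in the 'remaining' iterator);
-- next(remaining) = headD/tail (StopIteration is only reachable outside Pre_).
def bStep (st : List (List (String × String)) × PySem.Dict String String × Int × List Int)
    (kv : String × String) :
    List (List (String × String)) × PySem.Dict String String × Int × List Int :=
  if st.2.2.1 == 0 then
    (st.1 ++ [st.2.1.items], PySem.Dict.insert PySem.Dict.empty kv.1 kv.2,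
     st.2.2.2.headD 0 - 1, st.2.2.2.tail)
  else
    (st.1, st.2.1.insert kv.1 kv.2, st.2.2.1 - 1, st.2.2.2)

def partition_hosts_py_alt (records : List (String × String)) (num_workers : Int) :
    List (List (String × String)) :=
  let items := records
  let chunk_size := PySem.Int.floordiv (items.length : Int) num_workers
  let remainder := PySem.Int.mod (items.length : Int) num_workers
  let sizes := (PySem.List.pyRange 0 num_workers 1).map
      (fun i => chunk_size + (if i < remainder then 1 else 0))
  let st := items.foldl bStep ([], PySem.Dict.empty, sizes.headD 0, sizes.tail)
  st.1 ++ [st.2.1.items] ++ st.2.2.2.map (fun _ => [])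

-- ===== PRECONDITION & SPEC =====
-- Pre_ restricts to the natural domain num_workers ≥ 1: at num_workers = 0 A raises
-- ZeroDivisionError; a negative worker count is outside the task's natural domain
-- (A returns [] there by an accident of range(); B's single pass raises StopIteration).
def Pre_partition_hosts_py (records : List (String × String)) (num_workers : Int) : Prop :=
  1 ≤ num_workers
instance (records : List (String × String)) (num_workers : Int) : Decidable (Pre_partition_hosts_py records num_workers) := by unfold Pre_partition_hosts_py; infer_instance

def pvWitness_partition_hosts_py : (List (String × String)) × Int := ([("a", "g")], 1)

def Spec_partition_hosts_py (records : List (String × String)) (num_workers : Int) (out : List (List (String × String))) : Prop := out = partition_hosts_py_alt records num_workers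
instance (records : List (String × String)) (num_workers : Int) (out : List (List (String × String))) : Decidable (Spec_partition_hosts_py records num_workers out) := by unfold Spec_partition_hosts_py; infer_instance

-- ===== CLAIM (what is proved, stated in full; the proofs are below) =====
def Claim_equal_partition_hosts_py : Prop := ∀ (records : List (String × String)) (num_workers : Int), Dom_partition_hosts_py records num_workers → Pre_partition_hosts_py records num_workers → Spec_partition_hosts_py records num_workers (partition_hosts_py records num_workers)

-- ===== LEMMAS AND PROOFS =====

-- the contiguous-chunks reference both ports are reduced to
def chunksDicts (sizes : List Int) (xs : List (String × String)) : List (List (String × String)) :=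
  match sizes with
  | [] => []
  | s :: ss => (PySem.Dict.ofList (xs.take s.toNat)).items :: chunksDicts ss (xs.drop s.toNat)

def insertAll (d : PySem.Dict String String) (l : List (String × String)) : PySem.Dict String String :=
  l.foldl (fun d kv => d.insert kv.1 kv.2) d

lemma sum_toNat_of_nonneg : ∀ (l : List Int), (∀ x ∈ l, 0 ≤ x) → ((l.map Int.toNat).sum : Int) = l.sum := by
  intro l h
  induction l with
  | nil => simp
  | cons x t ih =>
    have hx := h x (by simp)
    have ht := ih (fun y hy => h y (by simp [hy]))
    simp only [List.map_cons, List.sum_cons]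
    push_cast at ht ⊢
    omega

lemma chunksDicts_nil_xs : ∀ (sizes : List Int), chunksDicts sizes [] = sizes.map (fun _ => []) := by
  intro sizes
  induction sizes with
  | nil => rfl
  | cons s ss ih =>
    simp only [chunksDicts, List.take_nil, List.drop_nil, ih, List.map_cons]
    rfl

lemma aFold (items : List (String × String)) (q r : Int) (hq : 0 ≤ q) :
    ∀ (is : List Int) (acc : List (List (String × String))) (start : Int), 0 ≤ start →
      is.foldl (aStep items q r) (acc, start)
        = (acc ++ chunksDicts (is.map (fun i => q + (if i < r then 1 else 0))) (items.drop start.toNat),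
           start + (is.map (fun i => q + (if i < r then 1 else 0))).sum) := by
  intro is
  induction is with
  | nil => intro acc start _; simp [chunksDicts]
  | cons i t ih =>
    intro acc start hstart
    have hs : 0 ≤ q + (if i < r then 1 else 0) := by split_ifs <;> omega
    have hstep : aStep items q r (acc, start) i
        = (acc ++ [(PySem.Dict.ofList
              ((items.drop start.toNat).take (q + (if i < r then 1 else 0)).toNat)).items],
           start + (q + (if i < r then 1 else 0))) := by
      unfold aStep
      simp only
      rw [PySem.List.slice_toNat items hstart (by omega : (0:Int) ≤ start + q + (if i < r then 1 else 0))]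
      simp only [Prod.mk.injEq]
      constructor
      · have hh : (start + q + (if i < r then 1 else 0)).toNat - start.toNat
            = (q + (if i < r then 1 else 0)).toNat := by omega
        rw [hh]
      · omega
    rw [List.foldl_cons, hstep, ih _ _ (by omega)]
    simp only [List.map_cons, chunksDicts, List.sum_cons]
    rw [List.drop_drop]
    simp only [Prod.mk.injEq]
    constructor
    · rw [show (start + (q + (if i < r then 1 else 0))).toNat
            = start.toNat + (q + (if i < r then 1 else 0)).toNat from by omega]
      simp [List.append_assoc]
    · omega

lemma bConsume : ∀ (xs : List (String × String)) (acc : List (List (String × String)))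
    (cur : PySem.Dict String String) (s : Int) (rest : List Int),
    xs.length = s.toNat → 0 ≤ s →
    xs.foldl bStep (acc, cur, s, rest) = (acc, insertAll cur xs, 0, rest) := by
  intro xs
  induction xs with
  | nil =>
    intro acc cur s rest hlen hs
    have : s = 0 := by simp only [List.length_nil] at hlen; omega
    simp [this, insertAll]
  | cons x t ih =>
    intro acc cur s rest hlen hs
    have hne : (s == 0) = false := beq_eq_false_iff_ne.mpr
      (by simp only [List.length_cons] at hlen; omega)
    rw [List.foldl_cons]
    have hstep : bStep (acc, cur, s, rest) x = (acc, cur.insert x.1 x.2, s - 1, rest) := by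
      simp [bStep, hne]
    rw [hstep]
    have := ih acc (cur.insert x.1 x.2) (s - 1) rest
      (by simp only [List.length_cons] at hlen; omega)
      (by simp only [List.length_cons] at hlen; omega)
    rw [this]
    rfl

lemma bChunks : ∀ (P Z : List Int) (xs : List (String × String))
    (acc : List (List (String × String))) (cur : PySem.Dict String String),
    (∀ s ∈ P, 0 < s) → (∀ z ∈ Z, z = 0) → xs.length = (P.map Int.toNat).sum →
    ((xs.foldl bStep (acc, cur, 0, P ++ Z)).1
      ++ [(xs.foldl bStep (acc, cur, 0, P ++ Z)).2.1.items]
      ++ (xs.foldl bStep (acc, cur, 0, P ++ Z)).2.2.2.map (fun _ => []))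
    = acc ++ cur.items :: chunksDicts (P ++ Z) xs := by
  intro P
  induction P with
  | nil =>
    intro Z xs acc cur _ _ hlen
    have hxs : xs = [] := by simpa using List.length_eq_zero_iff.mp (by simpa using hlen)
    subst hxs
    simp [chunksDicts_nil_xs]
  | cons s P' ih =>
    intro Z xs acc cur hP hZ hlen
    have hspos : 0 < s := hP s (by simp)
    simp only [List.map_cons, List.sum_cons] at hlen
    cases xs with
    | nil => simp at hlen; omega
    | cons x t =>
      simp only [List.length_cons] at hlen
      have hfirst : bStep (acc, cur, 0, (s :: P') ++ Z) x
          = (acc ++ [cur.items], PySem.Dict.insert PySem.Dict.empty x.1 x.2, s - 1, P' ++ Z) := by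
        simp [bStep]
      set k : Nat := (s - 1).toNat with hk
      have hkt : k ≤ t.length := by omega
      have hsplit : t.foldl bStep (acc ++ [cur.items], PySem.Dict.insert PySem.Dict.empty x.1 x.2, s - 1, P' ++ Z)
          = (t.drop k).foldl bStep ((t.take k).foldl bStep (acc ++ [cur.items], PySem.Dict.insert PySem.Dict.empty x.1 x.2, s - 1, P' ++ Z)) := by
        conv_lhs => rw [← List.take_append_drop k t]
        rw [List.foldl_append]
      have hcons := bConsume (t.take k) (acc ++ [cur.items]) (PySem.Dict.insert PySem.Dict.empty x.1 x.2) (s - 1) (P' ++ Z)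
          (by rw [List.length_take]; omega) (by omega)
      have hdroplen : (t.drop k).length = (P'.map Int.toNat).sum := by
        rw [List.length_drop]; omega
      have hrec := ih Z (t.drop k) (acc ++ [cur.items]) (insertAll (PySem.Dict.insert PySem.Dict.empty x.1 x.2) (t.take k))
          (fun y hy => hP y (by simp [hy])) hZ hdroplen
      rw [List.foldl_cons, hfirst, hsplit, hcons, hrec]
      have htake : (x :: t).take s.toNat = x :: t.take k := by
        rw [show s.toNat = k + 1 from by omega]
        rfl
      have hdrop : (x :: t).drop s.toNat = t.drop k := by
        rw [show s.toNat = k + 1 from by omega]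
        rfl
      have hdict : (insertAll (PySem.Dict.insert PySem.Dict.empty x.1 x.2) (t.take k)).items
          = (PySem.Dict.ofList ((x :: t).take s.toNat)).items := by
        rw [htake]
        rfl
      simp only [List.cons_append, chunksDicts, htake, hdrop, hdict]
      simp [List.append_assoc]

lemma sum_szf_hi (q r a b : Int) (hra : r ≤ a) :
    ((PySem.List.pyRange a b 1).map (fun i => q + (if i < r then 1 else 0))).sum
      = ((b - a).toNat : Int) * q := by
  have hcg : ((PySem.List.pyRange a b 1).map (fun i => q + (if i < r then 1 else 0)))
      = (PySem.List.pyRange a b 1).map (fun _ => q) := by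
    apply List.map_congr_left
    intro i hi
    rw [PySem.List.mem_pyRange_one] at hi
    rw [if_neg (by omega)]
    omega
  rw [hcg, PySem.List.sum_map_const_int, PySem.List.length_pyRange_one]

lemma sum_szf_lo (q r a b : Int) (hbr : b ≤ r) :
    ((PySem.List.pyRange a b 1).map (fun i => q + (if i < r then 1 else 0))).sum
      = ((b - a).toNat : Int) * (q + 1) := by
  have hcg : ((PySem.List.pyRange a b 1).map (fun i => q + (if i < r then 1 else 0)))
      = (PySem.List.pyRange a b 1).map (fun _ => q + 1) := by
    apply List.map_congr_left
    intro i hi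
    rw [PySem.List.mem_pyRange_one] at hi
    rw [if_pos (by omega)]
  rw [hcg, PySem.List.sum_map_const_int, PySem.List.length_pyRange_one]

lemma aMain (records : List (String × String)) (w : Int) (hw : 0 < w) :
    partition_hosts_py records w
      = chunksDicts ((PySem.List.pyRange 0 w 1).map
          (fun i => PySem.Int.floordiv (records.length : Int) w
            + (if i < PySem.Int.mod (records.length : Int) w then 1 else 0))) records := by
  have hq : 0 ≤ PySem.Int.floordiv (records.length : Int) w := by
    rw [PySem.Int.floordiv_eq_ediv_of_pos hw]
    exact Int.ediv_nonneg (by positivity) hw.le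
  simp only [partition_hosts_py]
  rw [aFold records _ _ hq (PySem.List.pyRange 0 w 1) [] 0 le_rfl]
  simp

lemma bMain (records : List (String × String)) (w : Int) (hw : 0 < w) :
    partition_hosts_py_alt records w
      = chunksDicts ((PySem.List.pyRange 0 w 1).map
          (fun i => PySem.Int.floordiv (records.length : Int) w
            + (if i < PySem.Int.mod (records.length : Int) w then 1 else 0))) records := by
  simp only [partition_hosts_py_alt]
  set n : Int := (records.length : Int) with hn
  set q : Int := PySem.Int.floordiv n w with hqdef
  set r : Int := PySem.Int.mod n w with hrdef
  set szf : Int → Int := fun i => q + (if i < r then 1 else 0) with hszf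
  have hq : 0 ≤ q := by
    rw [hqdef, PySem.Int.floordiv_eq_ediv_of_pos hw]
    exact Int.ediv_nonneg (by positivity) hw.le
  have hr0 : 0 ≤ r := PySem.Int.mod_nonneg n hw
  have hrw : r < w := PySem.Int.mod_lt n hw
  have hid : q * w + r = n := PySem.Int.floordiv_mul_add_mod n w
  have hnn : 0 ≤ n := by rw [hn]; positivity
  set s0 : Int := szf 0 with hs0def
  set rest : List Int := (PySem.List.pyRange 1 w 1).map szf with hrestdef
  have hsizes : (PySem.List.pyRange 0 w 1).map szf = s0 :: rest := by
    rw [PySem.List.pyRange_one_cons hw, List.map_cons, hs0def, hrestdef]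
    norm_num
  have htot : ((PySem.List.pyRange 0 w 1).map szf).sum = n := by
    rw [PySem.List.pyRange_one_append 0 r w hr0 hrw.le, List.map_append, List.sum_append,
        hszf, sum_szf_lo q r 0 r le_rfl, sum_szf_hi q r r w le_rfl]
    have c1 : ((r - 0).toNat : Int) = r := by omega
    have c2 : ((w - r).toNat : Int) = w - r := by omega
    rw [c1, c2]
    linear_combination hid
  have htot' : s0 + rest.sum = n := by
    rw [hsizes] at htot
    simpa using htot
  have hrestnn : ∀ x ∈ rest, 0 ≤ x := by
    intro x hx
    rw [hrestdef] at hx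
    obtain ⟨i, _, hix⟩ := List.mem_map.mp hx
    rw [hszf] at hix
    simp only at hix
    split_ifs at hix <;> omega
  have hrsum : 0 ≤ rest.sum := List.sum_nonneg hrestnn
  have hof : ∀ l : List (String × String),
      insertAll PySem.Dict.empty l = PySem.Dict.ofList l := fun _ => rfl
  have hemp : (PySem.Dict.empty : PySem.Dict String String).items = [] := rfl
  rw [hsizes]
  simp only [List.headD_cons, List.tail_cons]
  have hs0nn : 0 ≤ s0 := by
    rw [hs0def, hszf]
    simp only
    split_ifs <;> omega
  rcases eq_or_lt_of_le hs0nn with hs0 | hs0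
  · -- s0 = 0: no items at all
    have hqr : q = 0 ∧ r = 0 := by
      rw [hs0def, hszf] at hs0
      simp only at hs0
      split_ifs at hs0 <;> omega
    have hn0 : n = 0 := by rw [← hid, hqr.1, hqr.2]; ring
    have hrec : records = [] := by
      have : records.length = 0 := by omega
      exact List.length_eq_zero_iff.mp this
    rw [hrec]
    simp only [List.foldl_nil]
    rw [chunksDicts_nil_xs]
    simp [hemp]
  · -- 0 < s0: consume the first chunk, then bChunks on the rest
    have hlen : records.length = n.toNat := by omega
    have hsle : s0.toNat ≤ records.length := by omega
    have hlen_take : (records.take s0.toNat).length = s0.toNat := by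
      rw [List.length_take]; omega
    have hsplitf : records.foldl bStep ([], PySem.Dict.empty, s0, rest)
        = (records.drop s0.toNat).foldl bStep
            ((records.take s0.toNat).foldl bStep ([], PySem.Dict.empty, s0, rest)) := by
      conv_lhs => rw [← List.take_append_drop s0.toNat records]
      rw [List.foldl_append]
    rw [hsplitf, bConsume _ _ _ _ _ hlen_take (by omega)]
    have hdl : (records.drop s0.toNat).length = records.length - s0.toNat :=
      List.length_drop ..
    by_cases hq0 : q = 0
    · -- q = 0: rest = ones (indices < r) ++ zeros
      have hr1 : 0 < r := by
        by_contra hcon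
        rw [hs0def, hszf] at hs0
        simp only at hs0
        rw [if_neg (by omega)] at hs0
        omega
      have hs01 : s0 = 1 := by
        rw [hs0def, hszf]
        simp only
        rw [if_pos hr1]
        omega
      have hrestsplit : rest
          = (PySem.List.pyRange 1 r 1).map szf ++ (PySem.List.pyRange r w 1).map szf := by
        rw [hrestdef, ← List.map_append, ← PySem.List.pyRange_one_append 1 r w (by omega) hrw.le]
      have hPpos : ∀ x ∈ (PySem.List.pyRange 1 r 1).map szf, 0 < x := by
        intro x hx
        obtain ⟨i, hi, hix⟩ := List.mem_map.mp hx
        rw [PySem.List.mem_pyRange_one] at hi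
        rw [hszf] at hix
        simp only at hix
        rw [if_pos (by omega)] at hix
        omega
      have hZ0 : ∀ x ∈ (PySem.List.pyRange r w 1).map szf, x = 0 := by
        intro x hx
        obtain ⟨i, hi, hix⟩ := List.mem_map.mp hx
        rw [PySem.List.mem_pyRange_one] at hi
        rw [hszf] at hix
        simp only at hix
        rw [if_neg (by omega)] at hix
        omega
      have hPsumInt : (((PySem.List.pyRange 1 r 1).map szf).sum : Int) = r - 1 := by
        rw [hszf, sum_szf_lo q r 1 r le_rfl, hq0]
        have : ((r - 1).toNat : Int) = r - 1 := by omega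
        rw [this]; ring
      have hPnat : ((((PySem.List.pyRange 1 r 1).map szf).map Int.toNat).sum)
          = (records.drop s0.toNat).length := by
        have hc := sum_toNat_of_nonneg ((PySem.List.pyRange 1 r 1).map szf)
          (fun x hx => le_of_lt (hPpos x hx))
        rw [hPsumInt] at hc
        have hrn : r = n := by rw [← hid, hq0]; ring
        omega
      rw [hrestsplit,
          bChunks ((PySem.List.pyRange 1 r 1).map szf) ((PySem.List.pyRange r w 1).map szf)
            (records.drop s0.toNat) [] (insertAll PySem.Dict.empty (records.take s0.toNat))
            hPpos hZ0 hPnat.symm]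
      rw [← hrestsplit, hof]
      simp [chunksDicts]
    · -- q ≥ 1: every chunk capacity is positive
      have hPpos : ∀ x ∈ rest, 0 < x := by
        intro x hx
        rw [hrestdef] at hx
        obtain ⟨i, _, hix⟩ := List.mem_map.mp hx
        rw [hszf] at hix
        simp only at hix
        split_ifs at hix <;> omega
      have hPnat : ((rest.map Int.toNat).sum) = (records.drop s0.toNat).length := by
        have hc := sum_toNat_of_nonneg rest hrestnn
        omega
      have hrw0 : rest = rest ++ [] := by simp
      rw [hrw0,
          bChunks rest [] (records.drop s0.toNat) []
            (insertAll PySem.Dict.empty (records.take s0.toNat))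
            hPpos (by simp) (by simpa using hPnat.symm)]
      rw [hof]
      simp [chunksDicts]

-- ===== VERDICT (by name: the statement is the Claim_ definition above) =====
theorem partition_hosts_py_spec : Claim_equal_partition_hosts_py := by
  intro records num_workers _ hpre
  unfold Pre_partition_hosts_py at hpre
  have hw : 0 < num_workers := hpre
  unfold Spec_partition_hosts_py
  rw [aMain records num_workers hw, bMain records num_workers hw]
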